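-- pv_equiv track=rewrite | github.com/mohamedhamdy2021/Job-Alert | job_alert_bot.py | is_relevant_job
-- ===== SOURCE A (Python) =====
-- def is_relevant_job(title, description=""):
--     text = (title + " " + description).lower()
--
--     must_have = [
--         "embedded", "autosar", "automotive", "firmware", "ecu",
--         "can ", "canoe", "davinci", "vector", "bsw",
--         "c programmer", "c developer", "c engineer",
--         "software engineer", "python", "automation",
--         "rtos", "microcontroller", "arm", "stm32",
--         "valeo", "continental", "bosch", "aptiv", "denso"
--     ]
--
--     exclude = [
--         "senior manager", "director", "vp ", "vice president",
--         "10+ years", "15+ years", "principal",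
--         "java developer", "react developer", "angular", "frontend developer",
--         "data scientist", "machine learning engineer",
--         "php developer", "ruby", "swift developer", "ios developer", "ios"
--         "android", "full stack", "devops", "cloud architect" , "linux" , "full stack" ,
--     ]
--
--     for word in exclude:
--         if word in text:
--             return False
--
--     for word in must_have:
--         if word in text:
--             return True
--
--     return False
-- ===== SOURCE B (Python) =====
-- def is_relevant_job(title, description=""):
--     # Single left-to-right scan over the text: the keywords are bucketed by first
--     # character, so each position does one dict lookup and startswith only against
--     # the few keywords sharing that first character (exclude wins, must-have latched).
--     text = (title + " " + description).lower()
--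
--     must_have = [
--         "embedded", "autosar", "automotive", "firmware", "ecu",
--         "can ", "canoe", "davinci", "vector", "bsw",
--         "c programmer", "c developer", "c engineer",
--         "software engineer", "python", "automation",
--         "rtos", "microcontroller", "arm", "stm32",
--         "valeo", "continental", "bosch", "aptiv", "denso"
--     ]
--
--     exclude = [
--         "senior manager", "director", "vp ", "vice president",
--         "10+ years", "15+ years", "principal",
--         "java developer", "react developer", "angular", "frontend developer",
--         "data scientist", "machine learning engineer",
--         "php developer", "ruby", "swift developer", "ios developer", "ios"
--         "android", "full stack", "devops", "cloud architect", "linux",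
--     ]
--
--     excl_by = {}
--     for w in exclude:
--         excl_by.setdefault(w[0], []).append(w)
--     must_by = {}
--     for w in must_have:
--         must_by.setdefault(w[0], []).append(w)
--
--     found_must = False
--     for i in range(len(text)):
--         ws = excl_by.get(text[i])
--         if ws and any(text.startswith(w, i) for w in ws):
--             return False
--         if not found_must:
--             ws = must_by.get(text[i])
--             if ws and any(text.startswith(w, i) for w in ws):
--                 found_must = True
--     return found_must
-- ===== Notes on version B (the rewrite author's own statement) =====
-- stated objective: alternative
-- what changed: Replaces the two token-wise substring-membership loops of A (each keyword re-scans the whole text) by a first-character bucket index over the keywords (dicts built once with setdefault/append) and a single left-to-right scan over the text positions that tests startswith only against the bucket of the current character, returning False on the first exclude hit and latching a must-have flag; same token lists (including the accidental merged iosandroid token) and the same boolean priority.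
import Mathlib
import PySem

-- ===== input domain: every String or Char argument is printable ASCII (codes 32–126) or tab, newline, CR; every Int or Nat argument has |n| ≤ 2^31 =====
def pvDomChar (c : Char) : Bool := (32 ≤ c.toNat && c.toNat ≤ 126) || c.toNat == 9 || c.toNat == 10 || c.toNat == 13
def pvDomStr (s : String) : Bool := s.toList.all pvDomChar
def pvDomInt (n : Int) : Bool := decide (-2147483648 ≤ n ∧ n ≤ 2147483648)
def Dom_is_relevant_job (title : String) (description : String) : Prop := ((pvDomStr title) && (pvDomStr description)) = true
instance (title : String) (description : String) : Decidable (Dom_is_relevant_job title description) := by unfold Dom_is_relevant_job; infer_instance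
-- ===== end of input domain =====

-- B replaces the two token-wise `word in text` loops by one left-to-right scan over the
-- text with the keywords bucketed by first character (one dict lookup per position).

-- ===== PORT A =====
-- the two keyword lists of the Python (shared data; note the merged "ios" "android" literal
-- and the duplicated "full stack", exactly as in the source)
def pvMustHave : List String :=
  ["embedded", "autosar", "automotive", "firmware", "ecu",
   "can ", "canoe", "davinci", "vector", "bsw",
   "c programmer", "c developer", "c engineer",
   "software engineer", "python", "automation",
   "rtos", "microcontroller", "arm", "stm32",
   "valeo", "continental", "bosch", "aptiv", "denso"]

def pvExclude : List String :=
  ["senior manager", "director", "vp ", "vice president",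
   "10+ years", "15+ years", "principal",
   "java developer", "react developer", "angular", "frontend developer",
   "data scientist", "machine learning engineer",
   "php developer", "ruby", "swift developer", "ios developer", "iosandroid",
   "full stack", "devops", "cloud architect", "linux", "full stack"]

-- 'for word in ws: if word in text: return True/False' early-return loop
def pvLoopIn : List String → String → Bool
  | [], _ => false
  | w :: ws, t => if PySem.Str.isIn w t then true else pvLoopIn ws t

def is_relevant_job (title : String) (description : String) : Bool :=
  let text := PySem.Str.lower (title ++ " " ++ description)
  if pvLoopIn pvExclude text then false
  else if pvLoopIn pvMustHave text then true
  else false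

-- ===== PORT B =====
-- Source B buckets the keywords by first character (dict built with setdefault/append),
-- then scans the text once: at each position only the bucket of the current character
-- is tested with startswith; exclude returns False at once, must-have latches a flag.
-- (w[0]: the token lists contain no empty string, so headD's default is never used — exact here.)
def pvIndexByFirst (ws : List (List Char)) : PySem.Dict Char (List (List Char)) :=
  ws.foldl (fun d w => d.modify (w.headD ' ') [] (· ++ [w])) PySem.Dict.empty

-- '.get(c)' then 'if ws and any(...)': a missing or empty bucket fails the test, which is
-- exactly '(getD c []).any' since [].any _ = false
def pvScanIdx (eb mb : PySem.Dict Char (List (List Char))) (fm : Bool) : List Char → Bool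
  | [] => fm
  | c :: rest =>
      if (PySem.Dict.getD eb c []).any (fun w => w.isPrefixOf (c :: rest)) then false
      else
        pvScanIdx eb mb
          (fm || (PySem.Dict.getD mb c []).any (fun w => w.isPrefixOf (c :: rest))) rest

def is_relevant_job_alt (title : String) (description : String) : Bool :=
  let text := (PySem.Str.lower (title ++ " " ++ description)).toList
  let eb := pvIndexByFirst (pvExclude.map String.toList)
  let mb := pvIndexByFirst (pvMustHave.map String.toList)
  pvScanIdx eb mb false text

-- ===== PRECONDITION & SPEC =====
def Spec_is_relevant_job (title : String) (description : String) (out : Bool) : Prop := out = is_relevant_job_alt title description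
instance (title : String) (description : String) (out : Bool) : Decidable (Spec_is_relevant_job title description out) := by unfold Spec_is_relevant_job; infer_instance

-- ===== CLAIM (what is proved, stated in full; the proofs are below) =====
def Claim_equal_is_relevant_job : Prop := ∀ (title : String) (description : String), Dom_is_relevant_job title description → Spec_is_relevant_job title description (is_relevant_job title description)

-- ===== LEMMAS AND PROOFS =====

-- Bool 'any' distributes over a pointwise disjunction (used to split the suffix-scan test)
theorem pv_any_or {α : Type} (l : List α) (p q : α → Bool) :
    (l.any fun x => p x || q x) = (l.any p || l.any q) := by
  rw [Bool.eq_iff_iff]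
  simp only [List.any_eq_true, Bool.or_eq_true]
  constructor
  · rintro ⟨x, hx, h | h⟩
    · exact Or.inl ⟨x, hx, h⟩
    · exact Or.inr ⟨x, hx, h⟩
  · rintro (⟨x, hx, h⟩ | ⟨x, hx, h⟩) <;> exact ⟨x, hx, by simp [h]⟩

-- A's early-return loop is an existence test
theorem pvLoopIn_eq (ws : List String) (t : String) :
    pvLoopIn ws t = ws.any (fun w => PySem.Str.isIn w t) := by
  induction ws with
  | nil => rfl
  | cons w ws ih => by_cases h : PySem.Str.isIn w t <;> simp [pvLoopIn, ih]

-- a bucket lookup answers exactly 'some keyword starts here' (keywords nonempty)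
theorem pvBucket_aux (ws : List (List Char)) (d : PySem.Dict Char (List (List Char)))
    (c : Char) :
    (ws.foldl (fun d w => d.modify (w.headD ' ') [] (· ++ [w])) d).getD c []
      = d.getD c [] ++ ws.filter (fun w => w.headD ' ' == c) := by
  induction ws generalizing d with
  | nil => simp
  | cons w ws ih =>
      rw [List.foldl_cons, ih, PySem.Dict.getD_modify, List.filter_cons]
      by_cases h : w.head?.getD ' ' = c
      · simp [h, List.append_assoc]
      · simp [h, Ne.symm h]

theorem pvBucket_getD (ws : List (List Char)) (c : Char) :
    (pvIndexByFirst ws).getD c [] = ws.filter (fun w => w.headD ' ' == c) := by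
  rw [pvIndexByFirst, pvBucket_aux]
  simp [PySem.Dict.getD_empty]

theorem pvBucket_any (ws : List (List Char)) (h : ∀ w ∈ ws, w ≠ []) (c : Char)
    (rest : List Char) :
    ((pvIndexByFirst ws).getD c []).any (fun w => w.isPrefixOf (c :: rest))
      = ws.any (fun w => w.isPrefixOf (c :: rest)) := by
  rw [pvBucket_getD, Bool.eq_iff_iff]
  simp only [List.any_eq_true, List.mem_filter]
  constructor
  · rintro ⟨w, ⟨hw, -⟩, hp⟩
    exact ⟨w, hw, hp⟩
  · rintro ⟨w, hw, hp⟩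
    refine ⟨w, ⟨hw, ?_⟩, hp⟩
    obtain ⟨a, t, rfl⟩ : ∃ a t, w = a :: t := by
      cases w with
      | nil => exact absurd rfl (h [] hw)
      | cons a t => exact ⟨a, t, rfl⟩
    have := (List.cons_prefix_cons.mp (List.isPrefixOf_iff_prefix.mp hp)).1
    simp [this]

-- B's bucketed scan is the same pair of existence tests (infix = prefix of some suffix)
theorem pvScanIdx_eq (excl must : List (List Char))
    (hE : ∀ w ∈ excl, w ≠ []) (hM : ∀ w ∈ must, w ≠ [])
    (fm : Bool) (cs : List Char) :
    pvScanIdx (pvIndexByFirst excl) (pvIndexByFirst must) fm cs =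
      if excl.any (fun w => decide (w <:+: cs)) then false
      else (fm || must.any (fun w => decide (w <:+: cs))) := by
  induction cs generalizing fm with
  | nil =>
      have h1 : excl.any (fun w => decide (w <:+: ([] : List Char))) = false := by
        simp only [List.any_eq_false, List.infix_nil]
        simpa using hE
      have h2 : must.any (fun w => decide (w <:+: ([] : List Char))) = false := by
        simp only [List.any_eq_false, List.infix_nil]
        simpa using hM
      rw [pvScanIdx, h1, h2]
      simp
  | cons c rest ih =>
      rw [pvScanIdx, pvBucket_any excl hE, pvBucket_any must hM]
      by_cases hx : excl.any (fun w => w.isPrefixOf (c :: rest)) = true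
      · have : excl.any (fun w => decide (w <:+: (c :: rest))) = true := by
          rcases List.any_eq_true.mp hx with ⟨w, hw, hp⟩
          exact List.any_eq_true.mpr ⟨w, hw, by
            simpa using ((List.isPrefixOf_iff_prefix.mp (by simpa using hp)).isInfix)⟩
        simp [hx, this]
      · rw [if_neg hx, ih]
        by_cases he : excl.any (fun w => decide (w <:+: (c :: rest))) = true
        · -- an exclude word is infix of c :: rest but no prefix ⇒ infix of rest
          have : excl.any (fun w => decide (w <:+: rest)) = true := by
            rcases List.any_eq_true.mp he with ⟨w, hw, hinf⟩
            have hnp : ¬ w <+: (c :: rest) := by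
              intro hp
              exact hx (List.any_eq_true.mpr ⟨w, hw, by
                simpa using List.isPrefixOf_iff_prefix.mpr hp⟩)
            rcases (List.infix_cons_iff.mp (by simpa using hinf)) with h | h
            · exact absurd h hnp
            · exact List.any_eq_true.mpr ⟨w, hw, by simpa using h⟩
          simp [he, this]
        · have hrest : excl.any (fun w => decide (w <:+: rest)) = false := by
            rw [Bool.eq_false_iff]
            intro hr
            rcases List.any_eq_true.mp hr with ⟨w, hw, h⟩
            exact he (List.any_eq_true.mpr ⟨w, hw, by
              simpa using (by simpa using h : w <:+: rest).trans (List.suffix_cons c rest).isInfix⟩)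
          rw [if_neg (by simp [hrest]), if_neg (by simp_all)]
          -- must-have side: infix of c::rest ↔ prefix of c::rest ∨ infix of rest
          have hmust : ∀ w : List Char,
              decide (w <:+: (c :: rest)) = (w.isPrefixOf (c :: rest) || decide (w <:+: rest)) := by
            intro w
            by_cases hp : w <+: (c :: rest)
            · simp [List.isPrefixOf_iff_prefix.mpr hp, hp.isInfix]
            · simp [List.infix_cons_iff, hp,
                    (by rw [Bool.eq_false_iff]; exact fun h => hp (List.isPrefixOf_iff_prefix.mp h) : w.isPrefixOf (c :: rest) = false)]
          have hsplit : (must.any fun w => decide (w <:+: (c :: rest)))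
               = ((must.any fun w => w.isPrefixOf (c :: rest)) || must.any fun w => decide (w <:+: rest)) := by
            rw [List.any_congr rfl (fun w => hmust w), pv_any_or]
          rw [hsplit, Bool.or_assoc]

-- ===== VERDICT (by name: the statement is the Claim_ definition above) =====
theorem is_relevant_job_spec : Claim_equal_is_relevant_job := by
  intro title description _
  show is_relevant_job title description = is_relevant_job_alt title description
  simp only [is_relevant_job, is_relevant_job_alt]
  rw [pvScanIdx_eq _ _ (by decide) (by decide), pvLoopIn_eq, pvLoopIn_eq]
  simp only [List.any_map, Function.comp_def]
  have hiff : ∀ (w : String), PySem.Str.isIn w (PySem.Str.lower (title ++ " " ++ description))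
      = decide (w.toList <:+: (PySem.Str.lower (title ++ " " ++ description)).toList) := fun w => by
    rw [Bool.eq_iff_iff, decide_eq_true_eq]
    exact PySem.Str.isIn_iff_infix w _
  simp only [hiff]
  cases hE : pvExclude.any (fun w => decide (w.toList <:+: (PySem.Str.lower (title ++ " " ++ description)).toList)) <;>
    cases hM : pvMustHave.any (fun w => decide (w.toList <:+: (PySem.Str.lower (title ++ " " ++ description)).toList)) <;>
    simp
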